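-- pv_equiv track=rewrite | github.com/A1exAI00/MathModel | Lsystems.py | gen_hilb_curve
-- ===== SOURCE A (Python) =====
-- def gen_hilb_curve(nmax=5):
--     axiom = 'A'
--     string = axiom
--
--     for _ in range(nmax):
--         cur = []
--         cur_srt = ''
--         for j in string:
--             if j == 'A':
--                 cur.append('−BF+AFA+FB−')
--             elif j == 'B':
--                 cur.append('+AF−BFB−FA+')
--             elif j == '+':
--                 cur.append('+')
--             elif j == '-':
--                 cur.append('-')
--             elif j == 'F':
--                 cur.append('FF')
--
--         for j in cur:
--             cur_srt += str(j)
--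
--         string = cur_srt
--
--     return string
-- ===== SOURCE B (Python) =====
-- def gen_hilb_curve(nmax=5):
--     rules = {'A': '−BF+AFA+FB−', 'B': '+AF−BFB−FA+', '+': '+', '-': '-', 'F': 'FF'}
--
--     def expand(sym, depth):
--         if depth <= 0:
--             return sym
--         return ''.join(expand(c, depth - 1) for c in rules.get(sym, ''))
--
--     return expand('A', nmax)
-- ===== Notes on version B (the rewrite author's own statement) =====
-- stated objective: alternative
-- what changed: Level-by-level whole-string rewriting loop replaced by a top-down recursive expander that expands each symbol depth-first over the remaining depth via a rules dict with '' default.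
import Mathlib
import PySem

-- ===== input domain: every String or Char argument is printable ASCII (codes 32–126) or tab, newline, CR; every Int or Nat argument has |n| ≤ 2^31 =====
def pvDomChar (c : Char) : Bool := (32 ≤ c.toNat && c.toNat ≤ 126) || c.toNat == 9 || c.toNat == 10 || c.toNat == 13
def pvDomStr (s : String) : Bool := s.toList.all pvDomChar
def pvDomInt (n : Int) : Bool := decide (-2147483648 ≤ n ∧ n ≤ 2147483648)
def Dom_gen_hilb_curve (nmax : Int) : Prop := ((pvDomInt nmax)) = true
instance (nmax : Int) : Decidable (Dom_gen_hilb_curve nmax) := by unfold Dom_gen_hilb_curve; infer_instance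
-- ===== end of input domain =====

-- B replaces A's level-by-level whole-string rewriting loop with a top-down
-- depth-first recursive expander (alternative decomposition, same cost).

-- ===== PORT A =====
-- body of A's inner for-loop over the string: append the replacement (if any) to cur
def curStepA (acc : List (List Char)) (j : Char) : List (List Char) :=
  if j = 'A' then acc ++ ["−BF+AFA+FB−".toList]
  else if j = 'B' then acc ++ ["+AF−BFB−FA+".toList]
  else if j = '+' then acc ++ [['+']]
  else if j = '-' then acc ++ [['-']]
  else if j = 'F' then acc ++ [['F', 'F']]
  else acc

-- one iteration of A's outer loop: build cur, then concatenate it into cur_srt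
def stepA (s : List Char) : List Char :=
  let cur : List (List Char) := s.foldl curStepA []
  cur.foldl (fun cur_srt j => cur_srt ++ j) []

def loopA : Nat → List Char → List Char
  | 0, s => s
  | n + 1, s => loopA n (stepA s)

def gen_hilb_curve (nmax : Int) : String :=
  String.ofList (loopA nmax.toNat ['A'])

-- ===== PORT B =====
-- rules.get(sym, '') of Source B's dict
def rulesB (c : Char) : List Char :=
  if c = 'A' then "−BF+AFA+FB−".toList
  else if c = 'B' then "+AF−BFB−FA+".toList
  else if c = '+' then ['+']
  else if c = '-' then ['-']
  else if c = 'F' then ['F', 'F']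
  else []

def expandB (sym : Char) (depth : Int) : List Char :=
  if depth ≤ 0 then [sym]
  else (rulesB sym).flatMap (fun c => expandB c (depth - 1))
termination_by depth.toNat
decreasing_by omega

def gen_hilb_curve_alt (nmax : Int) : String :=
  String.ofList (expandB 'A' nmax)

-- ===== PRECONDITION & SPEC =====
def Spec_gen_hilb_curve (nmax : Int) (out : String) : Prop := out = gen_hilb_curve_alt nmax
instance (nmax : Int) (out : String) : Decidable (Spec_gen_hilb_curve nmax out) := by unfold Spec_gen_hilb_curve; infer_instance

-- ===== CLAIM (what is proved, stated in full; the proofs are below) =====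
def Claim_equal_gen_hilb_curve : Prop := ∀ (nmax : Int), Dom_gen_hilb_curve nmax → Spec_gen_hilb_curve nmax (gen_hilb_curve nmax)

-- ===== LEMMAS AND PROOFS =====

theorem catFold (l : List (List Char)) :
    ∀ acc : List Char, l.foldl (fun cur_srt j => cur_srt ++ j) acc = acc ++ l.flatten := by
  induction l with
  | nil => intro acc; simp
  | cons x t ih => intro acc; simp [ih, List.append_assoc]

theorem curFold (s : List Char) :
    ∀ acc : List (List Char), (s.foldl curStepA acc).flatten = acc.flatten ++ s.flatMap rulesB := by
  induction s with
  | nil => intro acc; simp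
  | cons c t ih =>
    intro acc
    rw [List.foldl_cons, ih, List.flatMap_cons, ← List.append_assoc]
    congr 1
    unfold curStepA rulesB
    split_ifs <;> simp

theorem stepA_eq_flatMap (s : List Char) : stepA s = s.flatMap rulesB := by
  unfold stepA
  rw [catFold, List.nil_append, curFold]
  simp

theorem expandB_zero (c : Char) (d : Int) (h : d ≤ 0) : expandB c d = [c] := by
  rw [expandB]; simp [h]

theorem expandB_succ (c : Char) (n : Nat) :
    expandB c ((n : Int) + 1) = (rulesB c).flatMap (fun x => expandB x (n : Int)) := by
  rw [expandB]
  have h : ¬ ((n : Int) + 1 ≤ 0) := by omega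
  simp [h]

theorem flatMap_flatMap' (s : List Char) (f : Char → List Char) (g : Char → List Char) :
    (s.flatMap f).flatMap g = s.flatMap (fun c => (f c).flatMap g) := by
  induction s with
  | nil => rfl
  | cons c t ih => simp [List.flatMap_cons, List.flatMap_append, ih]

theorem expandL_succ (s : List Char) (n : Nat) :
    s.flatMap (fun c => expandB c ((n : Int) + 1))
      = (stepA s).flatMap (fun c => expandB c (n : Int)) := by
  rw [stepA_eq_flatMap, flatMap_flatMap']
  exact List.flatMap_congr (fun c _ => expandB_succ c n)

theorem loopA_eq (n : Nat) : ∀ (s : List Char),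
    loopA n s = s.flatMap (fun c => expandB c (n : Int)) := by
  induction n with
  | zero =>
    intro s
    simp [loopA, expandB_zero]
  | succ m ih =>
    intro s
    show loopA m (stepA s) = _
    rw [ih (stepA s)]
    have h : ((m + 1 : Nat) : Int) = ((m : Int) + 1) := by push_cast; ring
    rw [h, expandL_succ]

theorem expandB_toNat (c : Char) (nmax : Int) :
    expandB c (nmax.toNat : Int) = expandB c nmax := by
  by_cases h : nmax ≤ 0
  · rw [expandB_zero c _ (by omega), expandB_zero c _ h]
  · congr 1; omega

-- ===== VERDICT (by name: the statement is the Claim_ definition above) =====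
theorem gen_hilb_curve_spec : Claim_equal_gen_hilb_curve := by
  intro nmax _
  show gen_hilb_curve nmax = gen_hilb_curve_alt nmax
  unfold gen_hilb_curve gen_hilb_curve_alt
  rw [loopA_eq, List.flatMap_cons, List.flatMap_nil, List.append_nil, expandB_toNat]
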